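-- pv_equiv track=rewrite | github.com/bubbleboy14/ctman | ctman/trans/html2latex/util.py | rowsets
-- ===== SOURCE A (Python) =====
-- def rowsets(rows):
-- 	sets = []
-- 	curnum = None
-- 	while len(rows):
-- 		item = rows.pop(0)
-- 		if curnum != len(item):
-- 			curnum = len(item)
-- 			if curnum == 1:
-- 				curset = []
-- 			else:
-- 				curset = [["   "] * curnum]
-- 			sets.append(curset)
-- 		curset.append(item)
-- 	if len(sets) == 1:
-- 		sets[0].pop(0)
-- 	return sets
-- ===== SOURCE B (Python) =====
-- def rowsets(rows):
--     sets = []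
--     i = 0
--     n = len(rows)
--     while i < n:
--         k = len(rows[i])
--         j = i + 1
--         while j < n and len(rows[j]) == k:
--             j += 1
--         run = rows[i:j]
--         if k == 1:
--             sets.append(run)
--         else:
--             sets.append([["   "] * k] + run)
--         i = j
--     if len(sets) == 1:
--         sets[0] = sets[0][1:]
--     return sets
-- ===== Notes on version B (the rewrite author's own statement) =====
-- stated objective: alternative
-- what changed: B replaces A's destructive pop(0) loop with per-item curnum/curset state tracking by a two-index run scan that finds each maximal run rows[i:j] of equal-length rows and emits it (with its header seed) in one append; B also leaves the rows argument unmutated where A empties it.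
import Mathlib
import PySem

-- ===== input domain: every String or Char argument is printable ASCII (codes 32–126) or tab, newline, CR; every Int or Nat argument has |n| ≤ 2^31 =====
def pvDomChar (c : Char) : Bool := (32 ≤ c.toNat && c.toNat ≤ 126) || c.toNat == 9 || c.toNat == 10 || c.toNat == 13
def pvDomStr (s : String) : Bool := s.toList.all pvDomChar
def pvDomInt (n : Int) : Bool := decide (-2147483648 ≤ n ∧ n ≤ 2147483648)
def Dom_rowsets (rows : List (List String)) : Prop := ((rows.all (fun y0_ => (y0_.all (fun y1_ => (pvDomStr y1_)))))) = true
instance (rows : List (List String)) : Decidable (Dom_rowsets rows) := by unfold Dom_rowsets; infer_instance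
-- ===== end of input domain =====

-- B groups rows by a two-index maximal-run scan instead of A's destructive pop(0) loop with
-- running curnum/curset state; equivalence is about the RETURN value only (A empties its
-- `rows` argument in place, B leaves it intact).

-- ===== PORT A =====
-- A's while loop: pops items off `rows`, tracking curnum (None initially) and the current
-- (aliased) curset; modelled by carrying the finished sets `acc` and the open `cur` separately,
-- appending `cur` when it closes or when the loop ends (only if a set was ever started).
def rowsetsLoop : List (List String) → Option Nat → List (List String) →
    List (List (List String)) → List (List (List String))
  | [], none, _, acc => acc
  | [], some _, cur, acc => acc ++ [cur]
  | item :: rest, cn, cur, acc =>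
    if cn = some item.length then
      rowsetsLoop rest cn (cur ++ [item]) acc
    else
      let seed : List (List String) :=
        if item.length = 1 then [] else [List.replicate item.length "   "]
      match cn with
      | none => rowsetsLoop rest (some item.length) (seed ++ [item]) acc
      | some _ => rowsetsLoop rest (some item.length) (seed ++ [item]) (acc ++ [cur])

def rowsets (rows : List (List String)) : List (List (List String)) :=
  let sets := rowsetsLoop rows none [] []
  -- final `if len(sets)==1: sets[0].pop(0)`; the single set is never empty (each set gets at
  -- least the item that opened it), so pop(0) = drop the first element
  match sets with
  | [s] => [s.drop 1]
  | _ => sets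

-- ===== PORT B =====
-- B's outer while loop over the start index i; each step consumes the maximal run of rows of
-- equal length (the inner j-scan = takeWhile/dropWhile on the tail) and emits one set.
def rowsetsScan : List (List String) → List (List (List String))
  | [] => []
  | r :: rest =>
    let k := r.length
    let run := r :: rest.takeWhile (fun x => x.length == k)
    (if k = 1 then run else List.replicate k "   " :: run)
      :: rowsetsScan (rest.dropWhile (fun x => x.length == k))
  termination_by rows => rows.length
  decreasing_by
    exact Nat.lt_succ_of_le (List.length_dropWhile_le _ _)

def rowsets_alt (rows : List (List String)) : List (List (List String)) :=
  let sets := rowsetsScan rows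
  if sets.length = 1 then [(sets.headD []).drop 1]   -- sets[0] = sets[0][1:]
  else sets

-- ===== PRECONDITION & SPEC =====
def Spec_rowsets (rows : List (List String)) (out : List (List (List String))) : Prop := out = rowsets_alt rows
instance (rows : List (List String)) (out : List (List (List String))) : Decidable (Spec_rowsets rows out) := by unfold Spec_rowsets; infer_instance

-- ===== CLAIM (what is proved, stated in full; the proofs are below) =====
def Claim_equal_rowsets : Prop := ∀ (rows : List (List String)), Dom_rowsets rows → Spec_rowsets rows (rowsets rows)

-- ===== LEMMAS AND PROOFS =====

-- The key invariant: inside an open group of length-k rows, A's loop produces the finished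
-- sets, then the open set extended by the maximal run of length-k rows, then B's scan of the
-- remainder.
theorem rowsetsLoop_inGroup (rest : List (List String)) :
    ∀ (k : Nat) (cur : List (List String)) (acc : List (List (List String))),
    rowsetsLoop rest (some k) cur acc =
      acc ++ [cur ++ rest.takeWhile (fun x => x.length == k)]
        ++ rowsetsScan (rest.dropWhile (fun x => x.length == k)) := by
  induction rest with
  | nil => intro k cur acc; simp [rowsetsLoop, rowsetsScan]
  | cons r rs ih =>
    intro k cur acc
    by_cases h : r.length = k
    · subst h
      simp only [rowsetsLoop, List.takeWhile, List.dropWhile, beq_self_eq_true, ih]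
      simp
    · have hne : some k ≠ some r.length := by
        simp; intro hc; exact h hc.symm
      have hb : (r.length == k) = false := by simp [h]
      have hstep : rowsetsLoop (r :: rs) (some k) cur acc =
          rowsetsLoop rs (some r.length)
            ((if r.length = 1 then [] else [List.replicate r.length "   "]) ++ [r])
            (acc ++ [cur]) := by
        simp [rowsetsLoop, hne]
      rw [hstep, ih]
      simp only [List.takeWhile, List.dropWhile, hb]
      rw [rowsetsScan]
      by_cases h1 : r.length = 1 <;> simp [h1]

theorem rowsetsLoop_eq_scan (rows : List (List String)) :
    rowsetsLoop rows none [] [] = rowsetsScan rows := by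
  cases rows with
  | nil => simp [rowsetsLoop, rowsetsScan]
  | cons r rs =>
    simp only [rowsetsLoop, reduceCtorEq]
    rw [rowsetsLoop_inGroup]
    rw [rowsetsScan]
    by_cases h1 : r.length = 1 <;> simp [h1]

-- ===== VERDICT (by name: the statement is the Claim_ definition above) =====
theorem rowsets_spec : Claim_equal_rowsets := by
  intro rows _
  unfold Spec_rowsets rowsets rowsets_alt
  rw [rowsetsLoop_eq_scan]
  cases h : rowsetsScan rows with
  | nil => simp
  | cons s t => cases t <;> simp
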